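-- pv_equiv track=rewrite | github.com/VickyViana/Destiny-tips-tool | p_acquisition/m_acquisition.py | reorder_func
-- ===== SOURCE A (Python) =====
-- def reorder_func(day_weather_list):
--     reordered_weather = [day_weather_list[0], day_weather_list[1], day_weather_list[2]]
--     for i in range(2, len(day_weather_list)):
--         if 'precipitation' in day_weather_list[i]:
--             reordered_weather.append(day_weather_list[i])
--     if len(reordered_weather)< 4:
--         reordered_weather.append('0')
--
--     for i in range(2, len(day_weather_list)):
--         if 'wind' in day_weather_list[i]:
--             reordered_weather.append(day_weather_list[i])
--     if len(reordered_weather)< 5: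
--         reordered_weather.append('0')
--
--     for i in range(2, len(day_weather_list)):
--         if 'pressure' in day_weather_list[i]:
--             reordered_weather.append(day_weather_list[i])
--     if len(reordered_weather)< 6:
--         reordered_weather.append('0')
--
--     return reordered_weather
-- ===== SOURCE B (Python) =====
-- def reorder_func(day_weather_list):
--     # one classifying pass over day_weather_list[2:] instead of three separate scans
--     precip, wind, pressure = [], [], []
--     for x in day_weather_list[2:]:
--         if 'precipitation' in x:
--             precip.append(x)
--         if 'wind' in x:
--             wind.append(x)
--         if 'pressure' in x:
--             pressure.append(x)
--     reordered = [day_weather_list[0], day_weather_list[1], day_weather_list[2]]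
--     reordered += precip
--     if len(reordered) < 4:
--         reordered.append('0')
--     reordered += wind
--     if len(reordered) < 5:
--         reordered.append('0')
--     reordered += pressure
--     if len(reordered) < 6:
--         reordered.append('0')
--     return reordered
-- ===== Notes on version B (the rewrite author's own statement) =====
-- stated objective: alternative
-- what changed: Replaces A's three separate full scans of the list (one per keyword) by a single classifying pass that builds the precipitation/wind/pressure groups at once, then assembles the result with the same cumulative default-'0' thresholds.
import Mathlib
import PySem

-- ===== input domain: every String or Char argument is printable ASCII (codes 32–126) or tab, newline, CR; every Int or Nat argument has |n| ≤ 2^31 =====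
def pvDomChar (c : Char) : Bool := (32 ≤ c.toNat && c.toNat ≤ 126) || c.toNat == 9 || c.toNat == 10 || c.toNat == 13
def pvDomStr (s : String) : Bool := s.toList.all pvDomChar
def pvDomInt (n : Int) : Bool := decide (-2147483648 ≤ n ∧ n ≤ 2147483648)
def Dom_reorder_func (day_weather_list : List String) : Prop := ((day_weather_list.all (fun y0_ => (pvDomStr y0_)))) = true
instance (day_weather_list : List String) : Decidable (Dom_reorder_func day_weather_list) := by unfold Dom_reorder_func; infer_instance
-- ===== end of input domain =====

-- B replaces A's three separate keyword scans by a single classifying pass (one loop building the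
-- three groups at once), keeping the same cumulative default-'0' thresholds; objective: alternative one-pass decomposition.


-- ===== PORT A =====
def reorder_func (day_weather_list : List String) : List String :=
  let r0 := [PySem.List.pyGetD day_weather_list 0 "", PySem.List.pyGetD day_weather_list 1 "",
             PySem.List.pyGetD day_weather_list 2 ""]
  let r1 := (PySem.List.pyRange 2 (PySem.List.len day_weather_list) 1).foldl
      (fun acc i => if PySem.Str.isIn "precipitation" (PySem.List.pyGetD day_weather_list i "") then
          acc ++ [PySem.List.pyGetD day_weather_list i ""] else acc) r0
  let r1 := if r1.length < 4 then r1 ++ ["0"] else r1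
  let r2 := (PySem.List.pyRange 2 (PySem.List.len day_weather_list) 1).foldl
      (fun acc i => if PySem.Str.isIn "wind" (PySem.List.pyGetD day_weather_list i "") then
          acc ++ [PySem.List.pyGetD day_weather_list i ""] else acc) r1
  let r2 := if r2.length < 5 then r2 ++ ["0"] else r2
  let r3 := (PySem.List.pyRange 2 (PySem.List.len day_weather_list) 1).foldl
      (fun acc i => if PySem.Str.isIn "pressure" (PySem.List.pyGetD day_weather_list i "") then
          acc ++ [PySem.List.pyGetD day_weather_list i ""] else acc) r2
  if r3.length < 6 then r3 ++ ["0"] else r3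

-- ===== PORT B =====
def reorder_func_alt (day_weather_list : List String) : List String :=
  let rest := PySem.List.slice day_weather_list (some 2) none
  let t := rest.foldl (fun (acc : List String × List String × List String) x =>
      let acc := if PySem.Str.isIn "precipitation" x then (acc.1 ++ [x], acc.2.1, acc.2.2) else acc
      let acc := if PySem.Str.isIn "wind" x then (acc.1, acc.2.1 ++ [x], acc.2.2) else acc
      if PySem.Str.isIn "pressure" x then (acc.1, acc.2.1, acc.2.2 ++ [x]) else acc)
    ([], [], [])
  let r := [PySem.List.pyGetD day_weather_list 0 "", PySem.List.pyGetD day_weather_list 1 "",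
            PySem.List.pyGetD day_weather_list 2 ""] ++ t.1
  let r := if r.length < 4 then r ++ ["0"] else r
  let r := r ++ t.2.1
  let r := if r.length < 5 then r ++ ["0"] else r
  let r := r ++ t.2.2
  if r.length < 6 then r ++ ["0"] else r

-- ===== PRECONDITION & SPEC =====
-- A raises IndexError when the list has fewer than 3 elements (day_weather_list[2]); excluded.
def Pre_reorder_func (day_weather_list : List String) : Prop := 3 ≤ day_weather_list.length
instance (day_weather_list : List String) : Decidable (Pre_reorder_func day_weather_list) := by
  unfold Pre_reorder_func; infer_instance
def pvWitness_reorder_func : List String := (["a", "b", "precipitation 3mm"])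
def Spec_reorder_func (day_weather_list : List String) (out : List String) : Prop :=
  out = reorder_func_alt day_weather_list
instance (day_weather_list : List String) (out : List String) :
    Decidable (Spec_reorder_func day_weather_list out) := by unfold Spec_reorder_func; infer_instance

-- ===== CLAIM (what is proved, stated in full; the proofs are below) =====
def Claim_equal_reorder_func : Prop := ∀ (day_weather_list : List String),
  Dom_reorder_func day_weather_list → Pre_reorder_func day_weather_list →
  Spec_reorder_func day_weather_list (reorder_func day_weather_list)

-- ===== LEMMAS AND PROOFS =====

lemma classify_fold (rest a b c : List String) :
    rest.foldl (fun (acc : List String × List String × List String) x =>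
      let acc := if PySem.Str.isIn "precipitation" x then (acc.1 ++ [x], acc.2.1, acc.2.2) else acc
      let acc := if PySem.Str.isIn "wind" x then (acc.1, acc.2.1 ++ [x], acc.2.2) else acc
      if PySem.Str.isIn "pressure" x then (acc.1, acc.2.1, acc.2.2 ++ [x]) else acc) (a, b, c)
    = (a ++ rest.filter (fun x => PySem.Str.isIn "precipitation" x),
       b ++ rest.filter (fun x => PySem.Str.isIn "wind" x),
       c ++ rest.filter (fun x => PySem.Str.isIn "pressure" x)) := by
  induction rest generalizing a b c with
  | nil => simp
  | cons x xs ih =>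
    simp only [List.foldl_cons, List.filter_cons]
    split_ifs <;> simp_all

-- ===== VERDICT (by name: the statement is the Claim_ definition above) =====
theorem reorder_func_spec : Claim_equal_reorder_func := by
  intro l _ _
  show reorder_func l = reorder_func_alt l
  simp only [reorder_func, reorder_func_alt, PySem.List.len_eq,
    PySem.List.slice_from l (show (0:Int) ≤ 2 by norm_num), classify_fold,
    PySem.List.foldl_pyRange_pyGetD' l ""
      (fun acc x => if PySem.Str.isIn "precipitation" x then acc ++ [x] else acc) _
      (show (0:Int) ≤ 2 by norm_num),
    PySem.List.foldl_pyRange_pyGetD' l ""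
      (fun acc x => if PySem.Str.isIn "wind" x then acc ++ [x] else acc) _
      (show (0:Int) ≤ 2 by norm_num),
    PySem.List.foldl_pyRange_pyGetD' l ""
      (fun acc x => if PySem.Str.isIn "pressure" x then acc ++ [x] else acc) _
      (show (0:Int) ≤ 2 by norm_num),
    PySem.List.foldl_append_if_eq_filter]
  simp only [List.length_append, List.length_cons, List.append_assoc,
    List.cons_append, List.nil_append]
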